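-- pv_equiv track=rewrite | github.com/AlaaNajmEddin/ProbabilisticBisimulationCheck | Prob-bisimulation-check/bisimilar_test_improved.py | distict_merge_tupels
-- ===== SOURCE A (Python) =====
-- from typing import Tuple
--
-- def distict_merge_tupels(tuples: list[Tuple[str, str]]):
--     if len(tuples) == 0:
--         return []
--
--     merged_tuples = []
--     # tuples is the cross product = [('X1', 'X1'), ('X1', 'Y1'), ('Y1', 'Y1'), ('X3', 'X3'), ('Y2', 'Y2'), ('Y2', 'Y3'), ('Y3', 'Y3'), ('X2', 'X2')]
--     # merge the tuples
--     # merged_tuples result = [('Y3', 'Y3', 'Y2'), ('Y1', 'Y1', 'X1'), ('X3', 'X3'), ('X2', 'X2')]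
--     # remove duplicates
--     for first, second in tuples:
--         flattend_list = list(sum(merged_tuples, ()))
--         if first not in flattend_list and second not in flattend_list:
--             merged_tuples.append((first, second))
--         else:
--             if first in flattend_list and second not in flattend_list:
--                 tuple_that_contains_item = find_tuple_that_contains_item(first, merged_tuples)
--                 merged_tuples.remove(tuple_that_contains_item)
--                 new_tuple = list(tuple_that_contains_item)
--                 new_tuple.append(second)
--                 merged_tuples.append(tuple(new_tuple))
--             elif second in flattend_list and first not in flattend_list:
--                 tuple_that_contains_item = find_tuple_that_contains_item(second, merged_tuples)
--                 merged_tuples.remove(tuple_that_contains_item)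
--                 new_tuple = list(tuple_that_contains_item)
--                 new_tuple.append(first)
--                 merged_tuples.append(tuple(new_tuple))
--
--     distinct_tuples = []
--     for not_distinct_tuple in merged_tuples:
--         distinct = []
--         for inner_tuple_item in not_distinct_tuple:
--             if not inner_tuple_item in distinct:
--                 distinct.append(inner_tuple_item)
--         distinct_tuples.append(tuple(distinct))
--
--     # distinct_tuples result = [('X1', 'Y1'), ('Y2', 'Y3'), ('X2',), ('X3',)]
--     return distinct_tuples
--
-- def find_tuple_that_contains_item(searched_item, merged_tuples) -> Tuple:
--     for tuple in merged_tuples: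
--         for item in tuple:
--             if item == searched_item:
--                 return tuple
-- ===== SOURCE B (Python) =====
-- from typing import Tuple
--
-- def distict_merge_tupels(tuples: list[Tuple[str, str]]):
--     # One pass with two dicts: element -> group id, and group id -> members
--     # (insertion-ordered; a group is re-inserted when extended, which moves it
--     # to the end exactly as A's remove+append does).
--     group_of = {}
--     groups = {}
--     for gid, (first, second) in enumerate(tuples):
--         if first in group_of:
--             if second not in group_of:
--                 g = group_of[first]
--                 groups[g] = groups.pop(g) + [second]
--                 group_of[second] = g
--         elif second in group_of:
--             g = group_of[second]
--             groups[g] = groups.pop(g) + [first]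
--             group_of[first] = g
--         else:
--             groups[gid] = [first] if first == second else [first, second]
--             group_of[first] = gid
--             group_of[second] = gid
--     return [tuple(g) for g in groups.values()]
-- ===== Notes on version B (the rewrite author's own statement) =====
-- stated objective: faster
-- what changed: Replaced A's per-pair rebuild of the flattened element list and linear find/remove over the group list, plus a final dedup pass, by a single pass keeping two dicts (element -> group id, group id -> deduplicated members in insertion order, re-inserted on extension to keep A's move-to-end order).
import Mathlib
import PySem

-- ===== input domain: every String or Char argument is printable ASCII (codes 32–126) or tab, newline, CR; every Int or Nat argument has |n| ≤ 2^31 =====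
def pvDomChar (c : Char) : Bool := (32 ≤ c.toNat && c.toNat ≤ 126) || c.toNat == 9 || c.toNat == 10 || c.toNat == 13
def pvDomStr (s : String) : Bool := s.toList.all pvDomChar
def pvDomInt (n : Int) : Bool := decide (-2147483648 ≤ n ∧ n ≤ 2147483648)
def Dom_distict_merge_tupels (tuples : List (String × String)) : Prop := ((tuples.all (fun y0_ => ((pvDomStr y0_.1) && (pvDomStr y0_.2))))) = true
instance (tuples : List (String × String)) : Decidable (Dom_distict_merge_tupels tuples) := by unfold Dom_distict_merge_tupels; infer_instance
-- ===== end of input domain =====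

-- B replaces A's quadratic flatten/find/remove scans and final dedup pass by one
-- pass over the pairs with two dicts (element -> group id, group id -> deduplicated
-- members, re-inserted on extension to reproduce A's move-to-end order): faster.

-- ===== PORT A =====
-- helper find_tuple_that_contains_item: first tuple containing the item (None if absent)
def pvFindTuple (x : String) : List (List String) → Option (List String)
  | [] => none
  | t :: rest => if x ∈ t then some t else pvFindTuple x rest

-- one iteration of A's merging loop (tuples are ported as lists)
def pvStepA (M : List (List String)) (pr : String × String) : List (List String) :=
  let first := pr.1
  let second := pr.2
  let fl := M.flatten
  if first ∉ fl ∧ second ∉ fl then M ++ [[first, second]]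
  else if first ∈ fl ∧ second ∉ fl then
    match pvFindTuple first M with
    | some t => ((PySem.List.remove? M t).getD M) ++ [t ++ [second]]  -- .remove then .append
    | none => M   -- unreachable: first ∈ flatten
  else if second ∈ fl ∧ first ∉ fl then
    match pvFindTuple second M with
    | some t => ((PySem.List.remove? M t).getD M) ++ [t ++ [first]]
    | none => M   -- unreachable: second ∈ flatten
  else M

-- A's final inner loop: keep first occurrences
def pvDedup (t : List String) : List String :=
  t.foldl (fun distinct x => if x ∈ distinct then distinct else distinct ++ [x]) []

def distict_merge_tupels (tuples : List (String × String)) : List (List String) :=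
  if tuples.length = 0 then []
  else (tuples.foldl pvStepA []).map pvDedup

-- ===== PORT B =====
-- one iteration of B's loop over enumerate(tuples): state = (group_of, groups)
def pvStepB (st : PySem.Dict String Int × PySem.Dict Int (List String))
    (e : Int × (String × String)) : PySem.Dict String Int × PySem.Dict Int (List String) :=
  let go := st.1
  let gs := st.2
  let gid := e.1
  let first := e.2.1
  let second := e.2.2
  if go.contains first then
    if go.contains second then st
    else
      match go.get? first with
      | some g =>
          (go.insert second g,
           (gs.erase g).insert g (((gs.get? g).getD []) ++ [second]))  -- groups[g] = groups.pop(g) + [second]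
      | none => st   -- unreachable: contains first
  else if go.contains second then
    match go.get? second with
    | some g =>
        (go.insert first g,
         (gs.erase g).insert g (((gs.get? g).getD []) ++ [first]))
    | none => st   -- unreachable: contains second
  else
    ((go.insert first gid).insert second gid,
     gs.insert gid (if first = second then [first] else [first, second]))

def distict_merge_tupels_alt (tuples : List (String × String)) : List (List String) :=
  ((PySem.List.enumerate tuples).foldl pvStepB (PySem.Dict.empty, PySem.Dict.empty)).2.values

-- ===== PRECONDITION & SPEC =====
def Spec_distict_merge_tupels (tuples : List (String × String)) (out : List (List String)) : Prop := out = distict_merge_tupels_alt tuples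
instance (tuples : List (String × String)) (out : List (List String)) : Decidable (Spec_distict_merge_tupels tuples out) := by unfold Spec_distict_merge_tupels; infer_instance

-- ===== CLAIM (what is proved, stated in full; the proofs are below) =====
def Claim_equal_distict_merge_tupels : Prop := ∀ (tuples : List (String × String)), Dom_distict_merge_tupels tuples → Spec_distict_merge_tupels tuples (distict_merge_tupels tuples)

-- ===== LEMMAS AND PROOFS =====

-- the per-entry relation between A's merged tuple and B's group entry
def pvP (t : List String) (p : Int × List String) : Prop := p.2 = pvDedup t ∧ t ≠ []

-- the simulation invariant between A's merged_tuples and B's (group_of, groups) after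
-- processing a prefix; k = next fresh group id
def pvInv (M : List (List String)) (go : PySem.Dict String Int)
    (gs : PySem.Dict Int (List String)) (k : Int) : Prop :=
  gs.keys.Nodup ∧
  (∀ p ∈ gs.items, p.1 < k) ∧
  List.Forall₂ pvP M gs.items ∧
  (∀ x g, go.get? x = some g ↔ ∃ ms, (g, ms) ∈ gs.items ∧ x ∈ ms)

lemma pvDedup_go_mem (l acc : List String) (y : String) :
    y ∈ l.foldl (fun distinct x => if x ∈ distinct then distinct else distinct ++ [x]) acc ↔
      y ∈ acc ∨ y ∈ l := by
  induction l generalizing acc with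
  | nil => simp
  | cons a l ih =>
    simp only [List.foldl_cons, ih, List.mem_cons]
    by_cases h : a ∈ acc
    · simp [h]
      constructor
      · tauto
      · rintro (h1 | h1 | h1) <;> simp_all
    · simp [h, List.mem_append]
      tauto

lemma mem_pvDedup (t : List String) (x : String) : x ∈ pvDedup t ↔ x ∈ t := by
  simp [pvDedup, pvDedup_go_mem]

lemma pvDedup_snoc (t : List String) (x : String) (hx : x ∉ t) :
    pvDedup (t ++ [x]) = pvDedup t ++ [x] := by
  have hx' : x ∉ pvDedup t := fun h => hx ((mem_pvDedup t x).1 h)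
  simp [pvDedup, List.foldl_append]
  intro h
  exact absurd h (by simpa [pvDedup] using hx')

lemma pvDedup_pair (a b : String) : pvDedup [a, b] = if a = b then [a] else [a, b] := by
  simp only [pvDedup, List.foldl_cons, List.foldl_nil]
  by_cases h : a = b <;> simp [h, eq_comm]

lemma pvRemove_cons_self {α : Type} [BEq α] [LawfulBEq α] (t : α) (M : List α) :
    PySem.List.remove? (t :: M) t = some M := by
  simp [PySem.List.remove?, List.idxOf?_cons]

lemma pvRemove_cons_ne {α : Type} [BEq α] [LawfulBEq α] (t t₀ : α) (M : List α) (h : ¬ (t = t₀)) :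
    PySem.List.remove? (t :: M) t₀ = (PySem.List.remove? M t₀).map (t :: ·) := by
  simp only [PySem.List.remove?, List.idxOf?_cons]
  have : (t == t₀) = false := by simpa using h
  simp [this, Option.map_map]
  cases List.idxOf? t₀ M <;> simp [List.eraseIdx]

-- the core alignment lemma for the "extend a group" case
lemma pvExtendAux (x : String) (g : Int) :
    ∀ (M : List (List String)) (its : List (Int × List String)),
    List.Forall₂ pvP M its → (its.map (·.1)).Nodup →
    ∀ ms, (∀ p ∈ its, x ∈ p.2 → p = (g, ms)) → (g, ms) ∈ its → x ∈ ms →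
    ∃ t₀ M', pvFindTuple x M = some t₀ ∧ PySem.List.remove? M t₀ = some M' ∧
      ms = pvDedup t₀ ∧ x ∈ t₀ ∧ t₀ ∈ M ∧
      List.Forall₂ pvP M' (its.filter (fun p => !(p.1 == g))) := by
  intro M its hf
  induction hf with
  | nil => intro _ ms _ hmem _; simp at hmem
  | @cons t p M its hp hrest ih =>
    intro hnd ms huniq hmem hx
    by_cases hxt : x ∈ t
    · have hxp : x ∈ p.2 := by rw [hp.1, mem_pvDedup]; exact hxt
      have hpeq : p = (g, ms) := huniq p (by simp) hxp
      have hgrest : ∀ q ∈ its, q.1 ≠ g := by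
        intro q hq hqg
        have : p.1 = g := by rw [hpeq]
        simp only [List.map_cons, List.nodup_cons] at hnd
        exact hnd.1 (by rw [← this] at hqg; exact (List.mem_map.2 ⟨q, hq, hqg.symm ▸ rfl⟩))
      refine ⟨t, M, ?_, pvRemove_cons_self t M, ?_, hxt, by simp, ?_⟩
      · simp [pvFindTuple, hxt]
      · rw [← hp.1, hpeq]
      · have h1 : List.filter (fun p => !(p.1 == g)) ((g, ms) :: its) = its.filter (fun p => !(p.1 == g)) := by
          simp [List.filter]
        rw [hpeq, h1]
        have h2 : its.filter (fun p => !(p.1 == g)) = its := by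
          apply List.filter_eq_self.2
          intro q hq; simpa using hgrest q hq
        rw [h2]; exact hrest
    · have hxp : x ∉ p.2 := by rw [hp.1, mem_pvDedup]; exact hxt
      have hpne : p ≠ (g, ms) := by intro h; rw [h] at hxp; exact hxp hx
      have hmem' : (g, ms) ∈ its := by
        rcases List.mem_cons.1 hmem with h | h
        · exact absurd h.symm hpne
        · exact h
      have hnd' : (its.map (·.1)).Nodup := by
        simp only [List.map_cons, List.nodup_cons] at hnd; exact hnd.2
      have huniq' : ∀ q ∈ its, x ∈ q.2 → q = (g, ms) := fun q hq => huniq q (by simp [hq])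
      obtain ⟨t₀, M', hfind, hrem, hms, hxt₀, ht₀M, hf'⟩ := ih hnd' ms huniq' hmem' hx
      have htne : t ≠ t₀ := by intro h; rw [h] at hxt; exact hxt hxt₀
      have hpkey : (p.1 == g) = false := by
        simp only [List.map_cons, List.nodup_cons] at hnd
        have : p.1 ≠ g := by
          intro h
          exact hnd.1 (List.mem_map.2 ⟨(g, ms), hmem', by simp [h]⟩) |>.elim
        simpa using this
      refine ⟨t₀, t :: M', ?_, ?_, hms, hxt₀, by simp [ht₀M], ?_⟩
      · simp [pvFindTuple, hxt, hfind]
      · rw [pvRemove_cons_ne t t₀ M htne, hrem]; rfl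
      · simp only [List.filter_cons, hpkey]
        exact List.Forall₂.cons hp hf'

-- with nodup keys, a key determines its value in items
lemma pvVal_unique {gs : PySem.Dict Int (List String)} (hnd : gs.keys.Nodup)
    {g : Int} {ms ms' : List String} (h1 : (g, ms) ∈ gs.items) (h2 : (g, ms') ∈ gs.items) :
    ms = ms' := by
  have e1 := PySem.Dict.get?_of_mem_items gs h1 hnd
  have e2 := PySem.Dict.get?_of_mem_items gs h2 hnd
  rw [e1] at e2; exact (Option.some.inj e2)

-- membership transfer across the Forall₂ correspondence
lemma pvForall₂_mem {M : List (List String)} {its : List (Int × List String)}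
    (hf : List.Forall₂ pvP M its) (y : String) :
    (∃ p ∈ its, y ∈ p.2) ↔ ∃ t ∈ M, y ∈ t := by
  induction hf with
  | nil => simp
  | @cons t p M its hp _ ih =>
    simp only [List.mem_cons]
    constructor
    · rintro ⟨q, hq | hq, hy⟩
      · exact ⟨t, Or.inl rfl, by rw [← mem_pvDedup, ← hp.1, ← hq]; exact hy⟩
      · obtain ⟨t', ht', hy'⟩ := ih.1 ⟨q, hq, hy⟩
        exact ⟨t', Or.inr ht', hy'⟩
    · rintro ⟨t', ht' | ht', hy⟩
      · exact ⟨p, Or.inl rfl, by rw [hp.1, mem_pvDedup, ← ht']; exact hy⟩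
      · obtain ⟨q, hq, hy'⟩ := ih.2 ⟨t', ht', hy⟩
        exact ⟨q, Or.inr hq, hy'⟩

-- bridge: B's membership dict answers A's flattened-list test
lemma pvBridge {M go gs k} (hinv : pvInv M go gs k) (y : String) :
    go.contains y = true ↔ y ∈ M.flatten := by
  obtain ⟨_, _, hf, hlook⟩ := hinv
  rw [PySem.Dict.contains_eq_isSome_get?, Option.isSome_iff_exists]
  constructor
  · rintro ⟨g, hg⟩
    obtain ⟨ms, hmem, hy⟩ := (hlook y g).1 hg
    exact List.mem_flatten.2 ((pvForall₂_mem hf y).1 ⟨(g, ms), hmem, hy⟩)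
  · intro h
    obtain ⟨q, hq, hy⟩ := (pvForall₂_mem hf y).2 (List.mem_flatten.1 h)
    exact ⟨q.1, (hlook y q.1).2 ⟨q.2, by simpa using hq, hy⟩⟩

lemma pvErase_contains_self {κ ν : Type} [BEq κ] [LawfulBEq κ] (d : PySem.Dict κ ν) (g : κ) :
    (d.erase g).contains g = false := by
  simp [PySem.Dict.erase, PySem.Dict.contains, List.any_filter]

-- the "extend an existing group" transition preserves the invariant (used for both
-- symmetric branches)
lemma pvInv_extend {M go gs k} (hinv : pvInv M go gs k) (x y : String)
    (hy : y ∉ M.flatten) {g : Int} (hg : go.get? x = some g) :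
    ∃ t₀, pvFindTuple x M = some t₀ ∧
      pvInv (((PySem.List.remove? M t₀).getD M) ++ [t₀ ++ [y]])
            (go.insert y g)
            ((gs.erase g).insert g (((gs.get? g).getD []) ++ [y]))
            (k + 1) := by
  obtain ⟨hnd, hbound, hf, hlook⟩ := hinv
  have hndm : (gs.items.map (·.1)).Nodup := by simpa [PySem.Dict.keys] using hnd
  obtain ⟨ms, hmsmem, hxms⟩ := (hlook x g).1 hg
  have hgety : go.get? y = none := by
    cases h : go.get? y with
    | none => rfl
    | some g' =>
      obtain ⟨ms', hm', hy'⟩ := (hlook y g').1 h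
      exact absurd (List.mem_flatten.2 ((pvForall₂_mem hf y).1 ⟨(g', ms'), hm', hy'⟩)) hy
  have hynot : ∀ p ∈ gs.items, y ∉ p.2 := by
    intro p hp hyp
    have : go.get? y = some p.1 := (hlook y p.1).2 ⟨p.2, by simpa using hp, hyp⟩
    simp [hgety] at this
  have huniq : ∀ p ∈ gs.items, x ∈ p.2 → p = (g, ms) := by
    intro p hp hxp
    have hgp : go.get? x = some p.1 := (hlook x p.1).2 ⟨p.2, by simpa using hp, hxp⟩
    rw [hg] at hgp
    have h1 : p.1 = g := (Option.some.inj hgp).symm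
    have h2 : p.2 = ms := by
      apply pvVal_unique hnd _ hmsmem
      rw [← h1]; simpa using hp
    calc p = (p.1, p.2) := rfl
      _ = (g, ms) := by rw [h1, h2]
  obtain ⟨t₀, M', hfind, hrem, hms, hxt₀, ht₀M, hf'⟩ :=
    pvExtendAux x g M gs.items hf hndm ms huniq hmsmem hxms
  have hget : gs.get? g = some ms := PySem.Dict.get?_of_mem_items gs hmsmem hnd
  have hyt₀ : y ∉ t₀ := fun h => hy (List.mem_flatten.2 ⟨t₀, ht₀M, h⟩)
  have hcont : (gs.erase g).contains g = false := pvErase_contains_self gs g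
  have hitems : ((gs.erase g).insert g (((gs.get? g).getD []) ++ [y])).items
      = gs.items.filter (fun p => !(p.1 == g)) ++ [(g, ms ++ [y])] := by
    rw [PySem.Dict.items_insert_of_not_contains _ _ hcont, hget]
    rfl
  refine ⟨t₀, hfind, ?_, ?_, ?_, ?_⟩
  · -- keys nodup
    apply PySem.Dict.nodup_keys_insert
    have : (gs.erase g).keys = (gs.items.filter (fun p => !(p.1 == g))).map (·.1) := rfl
    rw [this]
    exact (List.Sublist.map _ List.filter_sublist).nodup hndm
  · -- bound
    intro p hp
    rw [hitems] at hp
    rcases List.mem_append.1 hp with h | h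
    · have := hbound p (List.mem_of_mem_filter h); omega
    · simp only [List.mem_singleton] at h
      subst h
      have := hbound (g, ms) hmsmem; simp at this ⊢; omega
  · -- Forall₂
    rw [hitems, hrem]
    simp only [Option.getD_some]
    refine List.rel_append hf' (List.Forall₂.cons ⟨?_, by simp⟩ List.Forall₂.nil)
    simp only
    rw [pvDedup_snoc t₀ y hyt₀, hms]
  · -- lookup
    intro z g''
    rw [PySem.Dict.get?_insert, hitems]
    by_cases hz : z = y
    · subst hz
      rw [if_pos rfl]
      constructor
      · intro h
        have hgg : g'' = g := (Option.some.inj h).symm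
        subst hgg
        exact ⟨ms ++ [z], List.mem_append.2 (Or.inr (by simp)), by simp⟩
      · rintro ⟨ms', hm', hzm⟩
        rcases List.mem_append.1 hm' with h | h
        · exact absurd hzm (hynot _ (List.mem_of_mem_filter h))
        · simp only [List.mem_singleton, Prod.mk.injEq] at h
          simp [h.1]
    · rw [if_neg hz, hlook z g'']
      constructor
      · rintro ⟨ms', hm', hzm⟩
        by_cases hgg : g'' = g
        · subst hgg
          have : ms' = ms := pvVal_unique hnd hm' hmsmem
          subst this
          exact ⟨ms' ++ [y], List.mem_append.2 (Or.inr (by simp)), List.mem_append.2 (Or.inl hzm)⟩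
        · refine ⟨ms', List.mem_append.2 (Or.inl (List.mem_filter.2 ⟨hm', by simpa using hgg⟩)), hzm⟩
      · rintro ⟨ms', hm', hzm⟩
        rcases List.mem_append.1 hm' with h | h
        · exact ⟨ms', List.mem_of_mem_filter h, hzm⟩
        · simp only [List.mem_singleton, Prod.mk.injEq] at h
          obtain ⟨h1, h2⟩ := h
          subst h1
          rw [h2] at hzm
          rcases List.mem_append.1 hzm with h | h
          · exact ⟨ms, hmsmem, h⟩
          · simp only [List.mem_singleton] at h; exact absurd h hz

lemma pvInv_mono {M go gs} {k k' : Int} (hinv : pvInv M go gs k) (h : k ≤ k') :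
    pvInv M go gs k' := by
  obtain ⟨hnd, hbound, hff, hlook⟩ := hinv
  exact ⟨hnd, fun p hp => lt_of_lt_of_le (hbound p hp) h, hff, hlook⟩

-- the "open a fresh group" transition establishes the invariant
lemma pvInv_fresh {M go gs k} (hinv : pvInv M go gs k) (a b : String)
    (ha : go.contains a = false) (hb : go.contains b = false) :
    pvInv (M ++ [[a, b]])
          ((go.insert a k).insert b k)
          (gs.insert k (if a = b then [a] else [a, b]))
          (k + 1) := by
  obtain ⟨hnd, hbound, hf, hlook⟩ := hinv
  have hgeta : go.get? a = none := (PySem.Dict.get?_eq_none_iff_contains go a).2 ha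
  have hgetb : go.get? b = none := (PySem.Dict.get?_eq_none_iff_contains go b).2 hb
  have hanot : ∀ p ∈ gs.items, a ∉ p.2 := by
    intro p hp hap
    have : go.get? a = some p.1 := (hlook a p.1).2 ⟨p.2, by simpa using hp, hap⟩
    simp [hgeta] at this
  have hbnot : ∀ p ∈ gs.items, b ∉ p.2 := by
    intro p hp hbp
    have : go.get? b = some p.1 := (hlook b p.1).2 ⟨p.2, by simpa using hp, hbp⟩
    simp [hgetb] at this
  have hck : gs.contains k = false := by
    cases h : gs.contains k with
    | false => rfl
    | true =>
      obtain ⟨p, hp, hpk⟩ := List.any_eq_true.1 h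
      have := hbound p hp
      have : p.1 = k := by simpa using hpk
      omega
  have hitems : (gs.insert k (if a = b then [a] else [a, b])).items
      = gs.items ++ [(k, if a = b then [a] else [a, b])] :=
    PySem.Dict.items_insert_of_not_contains _ _ hck
  have hms0 : a ∈ (if a = b then [a] else [a, b]) ∧ b ∈ (if a = b then [a] else [a, b]) := by
    by_cases h : a = b <;> simp [h]
  refine ⟨PySem.Dict.nodup_keys_insert _ _ _ hnd, ?_, ?_, ?_⟩
  · intro p hp
    rw [hitems] at hp
    rcases List.mem_append.1 hp with h | h
    · have := hbound p h; omega
    · simp only [List.mem_singleton] at h; rw [h]; simp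
  · rw [hitems]
    refine List.rel_append hf (List.Forall₂.cons ⟨?_, by simp⟩ List.Forall₂.nil)
    simp only
    rw [pvDedup_pair]
  · intro z g''
    rw [PySem.Dict.get?_insert, PySem.Dict.get?_insert, hitems]
    by_cases hzb : z = b
    · subst hzb
      rw [if_pos rfl]
      constructor
      · intro h
        exact ⟨_, List.mem_append.2 (Or.inr (by simp [← Option.some.inj h])), hms0.2⟩
      · rintro ⟨ms', hm', hzm⟩
        rcases List.mem_append.1 hm' with h | h
        · exact absurd hzm (hbnot _ h)
        · simp only [List.mem_singleton, Prod.mk.injEq] at h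
          simp [h.1]
    · rw [if_neg hzb]
      by_cases hza : z = a
      · subst hza
        rw [if_pos rfl]
        constructor
        · intro h
          exact ⟨_, List.mem_append.2 (Or.inr (by simp [← Option.some.inj h])), hms0.1⟩
        · rintro ⟨ms', hm', hzm⟩
          rcases List.mem_append.1 hm' with h | h
          · exact absurd hzm (hanot _ h)
          · simp only [List.mem_singleton, Prod.mk.injEq] at h
            simp [h.1]
      · rw [if_neg hza, hlook z g'']
        constructor
        · rintro ⟨ms', hm', hzm⟩
          exact ⟨ms', List.mem_append.2 (Or.inl hm'), hzm⟩
        · rintro ⟨ms', hm', hzm⟩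
          rcases List.mem_append.1 hm' with h | h
          · exact ⟨ms', h, hzm⟩
          · simp only [List.mem_singleton, Prod.mk.injEq] at h
            rw [h.2] at hzm
            by_cases hab : a = b <;> simp [hab] at hzm <;> tauto

lemma pvInv_step {M go gs k} (hinv : pvInv M go gs k) (pr : String × String) :
    pvInv (pvStepA M pr) (pvStepB (go, gs) (k, pr)).1 (pvStepB (go, gs) (k, pr)).2 (k + 1) := by
  have hb1 := pvBridge hinv pr.1
  have hb2 := pvBridge hinv pr.2
  by_cases h1 : go.contains pr.1 = true <;> by_cases h2 : go.contains pr.2 = true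
  · -- both seen: both sides skip
    have hf1 : pr.1 ∈ M.flatten := hb1.1 h1
    have hf2 : pr.2 ∈ M.flatten := hb2.1 h2
    simp only [pvStepA, pvStepB, h1, h2, if_true]
    rw [if_neg (by tauto), if_neg (by tauto), if_neg (by tauto)]
    exact pvInv_mono hinv (by omega)
  · -- first seen, second new: extend first's group with second
    have hf1 : pr.1 ∈ M.flatten := hb1.1 h1
    have hf2 : pr.2 ∉ M.flatten := fun h => h2 (hb2.2 h)
    obtain ⟨g, hg⟩ : ∃ g, go.get? pr.1 = some g := by
      rw [PySem.Dict.contains_eq_isSome_get?] at h1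
      exact Option.isSome_iff_exists.1 h1
    obtain ⟨t₀, hfind, hinv'⟩ := pvInv_extend hinv pr.1 pr.2 hf2 hg
    simp only [pvStepA, pvStepB, h1, if_true, Bool.not_eq_true] at *
    rw [if_neg (by tauto), if_pos ⟨hf1, hf2⟩, hfind]
    simpa [h2, hg] using hinv'
  · -- second seen, first new: extend second's group with first
    have hf2 : pr.2 ∈ M.flatten := hb2.1 h2
    have hf1 : pr.1 ∉ M.flatten := fun h => h1 (hb1.2 h)
    obtain ⟨g, hg⟩ : ∃ g, go.get? pr.2 = some g := by
      rw [PySem.Dict.contains_eq_isSome_get?] at h2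
      exact Option.isSome_iff_exists.1 h2
    obtain ⟨t₀, hfind, hinv'⟩ := pvInv_extend hinv pr.2 pr.1 hf1 hg
    simp only [pvStepA, pvStepB] at *
    rw [if_neg (by tauto), if_neg (by tauto), if_pos ⟨hf2, hf1⟩, hfind]
    have h1' : go.contains pr.1 = false := by simpa using h1
    simpa [h1', h2, hg] using hinv'
  · -- both new: open a fresh group
    have hf1 : pr.1 ∉ M.flatten := fun h => h1 (hb1.2 h)
    have hf2 : pr.2 ∉ M.flatten := fun h => h2 (hb2.2 h)
    have h1' : go.contains pr.1 = false := by simpa using h1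
    have h2' : go.contains pr.2 = false := by simpa using h2
    simp only [pvStepA, pvStepB]
    rw [if_pos ⟨hf1, hf2⟩]
    simpa [h1', h2'] using pvInv_fresh hinv pr.1 pr.2 h1' h2'

lemma pvEnumerate_cons {α : Type} (x : α) (xs : List α) (k : Int) :
    PySem.List.enumerate (x :: xs) k = (k, x) :: PySem.List.enumerate xs (k + 1) := rfl

lemma pvInv_fold : ∀ (ts : List (String × String)) (M : List (List String)) go gs (k : Int),
    pvInv M go gs k →
    pvInv (ts.foldl pvStepA M)
      ((PySem.List.enumerate ts k).foldl pvStepB (go, gs)).1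
      ((PySem.List.enumerate ts k).foldl pvStepB (go, gs)).2
      (k + ts.length) := by
  intro ts
  induction ts with
  | nil => intro M go gs k h; simpa [PySem.List.enumerate] using h
  | cons pr ts ih =>
    intro M go gs k h
    have hstep := pvInv_step h pr
    have := ih (pvStepA M pr) (pvStepB (go, gs) (k, pr)).1 (pvStepB (go, gs) (k, pr)).2 (k + 1) hstep
    rw [pvEnumerate_cons]
    simp only [List.foldl_cons, List.length_cons]
    have harith : k + 1 + (ts.length : Int) = k + ((ts.length : Int) + 1) := by ring
    rw [harith] at this
    push_cast
    exact this

lemma pvForall₂_values {M : List (List String)} {its : List (Int × List String)}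
    (h : List.Forall₂ pvP M its) : its.map (·.2) = M.map pvDedup := by
  induction h with
  | nil => rfl
  | cons hp _ ih => simp [ih, hp.1]

-- ===== VERDICT (by name: the statement is the Claim_ definition above) =====
theorem distict_merge_tupels_spec : Claim_equal_distict_merge_tupels := by
  intro tuples _
  unfold Spec_distict_merge_tupels distict_merge_tupels distict_merge_tupels_alt
  have hinv0 : pvInv [] PySem.Dict.empty PySem.Dict.empty 0 := by
    refine ⟨by simp [PySem.Dict.empty, PySem.Dict.keys], by simp [PySem.Dict.empty], List.Forall₂.nil, ?_⟩
    intro x g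
    simp [PySem.Dict.get?, PySem.Dict.empty]
  have h := pvInv_fold tuples [] PySem.Dict.empty PySem.Dict.empty 0 hinv0
  obtain ⟨_, _, hf, _⟩ := h
  have hvals := pvForall₂_values hf
  cases tuples with
  | nil => simp [PySem.List.enumerate, PySem.Dict.values, PySem.Dict.empty]
  | cons pr ts =>
    simp only [List.length_cons, if_neg (Nat.succ_ne_zero _)]
    simpa [PySem.Dict.values] using hvals.symm
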